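-- pv_equiv track=rewrite | github.com/aeeeeeep/ModelLink | ascendspeed/data/data_handler.py | _get_data_format
-- ===== SOURCE A (Python) =====
-- def _get_data_format(files):
--     """get format with largest number"""
--     all_support_format = {
--         'parquet': 'parquet',
--         'arrow': 'arrow',
--         'csv': 'csv',
--         'json': 'json',
--         'jsonl': 'json',
--         'txt': 'text'
--     }
--     format_num = {}
--     for file in files:
--         ext = file.split('.')[-1]
--         format_num[ext] = format_num.get(ext, 0) + 1
--     exts_with_num = sorted(format_num.items(), key=lambda x: x[1], reverse=True)
--     has_data_file = False
--     for ext, _ in exts_with_num: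
--         if ext in all_support_format:
--             has_data_file = True
--             break
--
--     return (ext, all_support_format[ext]) if has_data_file else (None, None)
-- ===== SOURCE B (Python) =====
-- def _get_data_format(files):
--     """get format with largest number"""
--     all_support_format = {
--         'parquet': 'parquet',
--         'arrow': 'arrow',
--         'csv': 'csv',
--         'json': 'json',
--         'jsonl': 'json',
--         'txt': 'text'
--     }
--     counts = {}
--     for file in files:
--         ext = file.split('.')[-1]
--         counts[ext] = counts.get(ext, 0) + 1
--     best_ext = None
--     best_count = 0
--     for ext, cnt in counts.items():
--         if ext in all_support_format and cnt > best_count: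
--             best_ext, best_count = ext, cnt
--     if best_ext is None:
--         return (None, None)
--     return (best_ext, all_support_format[best_ext])
-- ===== Notes on version B (the rewrite author's own statement) =====
-- stated objective: simpler
-- what changed: A sorts the extension counts by count (descending, stable) and scans the sorted list for the first supported extension; B skips the sort and does one strict-greater selection pass over the insertion-ordered counts, which preserves the first-seen tie-break.
import Mathlib
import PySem

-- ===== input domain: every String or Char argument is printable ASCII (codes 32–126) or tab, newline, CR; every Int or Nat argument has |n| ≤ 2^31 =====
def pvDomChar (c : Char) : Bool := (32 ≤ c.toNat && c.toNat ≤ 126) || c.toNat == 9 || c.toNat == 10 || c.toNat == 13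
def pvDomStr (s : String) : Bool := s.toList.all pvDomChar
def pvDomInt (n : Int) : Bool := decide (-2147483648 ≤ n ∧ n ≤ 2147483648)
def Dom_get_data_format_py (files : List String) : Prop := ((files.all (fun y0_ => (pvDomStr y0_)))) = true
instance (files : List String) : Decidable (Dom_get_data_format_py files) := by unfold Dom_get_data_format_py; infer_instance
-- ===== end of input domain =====

-- B replaces A's sort-then-scan by a single strict-greater selection pass over the
-- insertion-ordered counts (objective: simpler; same result incl. first-seen tie-break).

-- ===== PORT A =====

-- the supported-format dict (shared constant of both Pythons)
def pvSupport : PySem.Dict String String :=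
  PySem.Dict.ofList [("parquet", "parquet"), ("arrow", "arrow"), ("csv", "csv"),
                     ("json", "json"), ("jsonl", "json"), ("txt", "text")]

-- file.split('.')[-1]  (exact: sep "." ≠ "" so split? is some, and the split list is nonempty so [-1] hits)
def pvExtOf (file : String) : String :=
  match PySem.Str.split? file "." with
  | some parts => (PySem.List.pyGet? parts (-1)).getD ""
  | none => ""

-- the 'for ext, _ in exts_with_num: if ext in all_support_format: break' loop (first supported pair)
def pvFindSupported : List (String × Int) → Option String
  | [] => none
  | (e, _) :: t => if pvSupport.contains e then some e else pvFindSupported t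

def get_data_format_py (files : List String) : Option String × Option String :=
  let format_num := files.foldl (fun d f => d.modify (pvExtOf f) 0 (· + 1))
    (PySem.Dict.empty : PySem.Dict String Int)
  let exts_with_num := PySem.List.sorted format_num.items (fun x => x.2) true
  match pvFindSupported exts_with_num with
  | some ext => (some ext, pvSupport.get? ext)
  | none => (none, none)

-- ===== PORT B =====

def get_data_format_py_alt (files : List String) : Option String × Option String :=
  let counts := files.foldl (fun d f => d.modify (pvExtOf f) 0 (· + 1))
    (PySem.Dict.empty : PySem.Dict String Int)
  let best := counts.items.foldl
    (fun (b : Option String × Int) p =>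
      if pvSupport.contains p.1 && decide (b.2 < p.2) then (some p.1, p.2) else b)
    (none, 0)
  match best.1 with
  | some e => (some e, pvSupport.get? e)
  | none => (none, none)

-- ===== PRECONDITION & SPEC =====
def Spec_get_data_format_py (files : List String) (out : Option String × Option String) : Prop := out = get_data_format_py_alt files
instance (files : List String) (out : Option String × Option String) : Decidable (Spec_get_data_format_py files out) := by unfold Spec_get_data_format_py; infer_instance

-- ===== CLAIM (what is proved, stated in full; the proofs are below) =====
def Claim_equal_get_data_format_py : Prop := ∀ (files : List String), Dom_get_data_format_py files → Spec_get_data_format_py files (get_data_format_py files)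

-- ===== LEMMAS AND PROOFS =====

-- the selection step of B's second loop
def pvStep (b : Option String × Int) (p : String × Int) : Option String × Int :=
  if pvSupport.contains p.1 && decide (b.2 < p.2) then (some p.1, p.2) else b

-- view of A's search result as B's accumulator
def pvConv : Option (String × Int) → Option String × Int
  | none => (none, 0)
  | some (e, c) => (some e, c)

theorem pvFind_eq_find? (l : List (String × Int)) :
    pvFindSupported l = (l.find? (fun p => pvSupport.contains p.1)).map (·.1) := by
  induction l with
  | nil => rfl
  | cons p t ih =>
    obtain ⟨e, c⟩ := p
    simp only [pvFindSupported, List.find?]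
    by_cases h : pvSupport.contains e = true
    · simp [h]
    · simp [h, ih]

-- one insertion into a descending-sorted list versus one selection step
theorem pvStep_insertBy (x : String × Int) (s : List (String × Int))
    (hs : s.Pairwise (fun a b => b.2 ≤ a.2)) (hx : 1 ≤ x.2) :
    pvConv ((PySem.List.insertBy (fun a b => decide (b.2 < a.2)) x s).find?
              (fun p => pvSupport.contains p.1))
      = pvStep (pvConv (s.find? (fun p => pvSupport.contains p.1))) x := by
  induction s with
  | nil =>
    by_cases h : pvSupport.contains x.1 = true
    · simp [PySem.List.insertBy, pvStep, pvConv, List.find?, h]; omega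
    · simp [PySem.List.insertBy, pvStep, pvConv, List.find?, h]
  | cons y t ih =>
    have hyt : ∀ z ∈ t, z.2 ≤ y.2 := (List.pairwise_cons.mp hs).1
    have ht : t.Pairwise (fun a b => b.2 ≤ a.2) := (List.pairwise_cons.mp hs).2
    simp only [PySem.List.insertBy]
    by_cases hlt : y.2 < x.2
    · -- x is inserted here, before y
      simp only [decide_eq_true_eq, if_pos hlt]
      by_cases hsx : pvSupport.contains x.1 = true
      · -- x supported: it becomes the first supported element
        rw [List.find?_cons_of_pos (by simpa using hsx)]
        cases hf : (y :: t).find? (fun p => pvSupport.contains p.1) with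
        | none => simp [pvConv, pvStep, hsx]; omega
        | some q =>
          have hq : q.2 ≤ y.2 := by
            rcases List.mem_cons.mp (List.mem_of_find?_eq_some hf) with h1 | h2
            · exact le_of_eq (by rw [h1])
            · exact hyt q h2
          obtain ⟨qe, qc⟩ := q
          simp only at hq
          simp [pvConv, pvStep, hsx, show qc < x.2 by omega]
      · -- x unsupported: first supported element unchanged
        rw [List.find?_cons_of_neg (by simpa using hsx)]
        simp [pvStep, hsx]
    · -- x goes past y
      simp only [decide_eq_true_eq, if_neg hlt]
      by_cases hsy : pvSupport.contains y.1 = true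
      · -- y is the first supported element on both sides; y.2 ≥ x.2 blocks the step
        rw [List.find?_cons_of_pos (by simpa using hsy),
            List.find?_cons_of_pos (by simpa using hsy)]
        obtain ⟨ye, yc⟩ := y
        simp only at hlt
        simp [pvConv, pvStep, show ¬ (yc < x.2) by omega]
      · rw [List.find?_cons_of_neg (by simpa using hsy),
            List.find?_cons_of_neg (by simpa using hsy)]
        exact ih ht

theorem pvSel_eq_sorted (l : List (String × Int)) (hl : ∀ p ∈ l, 1 ≤ p.2) :
    l.foldl (fun (b : Option String × Int) p =>
        if pvSupport.contains p.1 && decide (b.2 < p.2) then (some p.1, p.2) else b) (none, 0)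
      = pvConv ((PySem.List.sorted l (fun x => x.2) true).find?
                  (fun p => pvSupport.contains p.1)) := by
  show l.foldl pvStep (none, 0) = _
  induction l using List.reverseRecOn with
  | nil => rfl
  | append_singleton t x ih =>
    have ht : ∀ p ∈ t, 1 ≤ p.2 := fun p hp => hl p (by simp [hp])
    rw [List.foldl_append, List.foldl_cons, List.foldl_nil, ih ht,
        PySem.List.sorted_rev_eq_foldl_insertBy (t ++ [x]), List.foldl_append, List.foldl_cons,
        List.foldl_nil, ← PySem.List.sorted_rev_eq_foldl_insertBy,
        pvStep_insertBy x _ (PySem.List.sorted_pairwise_rev t (fun x => x.2))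
          (hl x (by simp))]

theorem pvCounts_items_pos (files : List String) :
    ∀ p ∈ (files.foldl (fun d f => d.modify (pvExtOf f) 0 (· + 1))
            (PySem.Dict.empty : PySem.Dict String Int)).items, 1 ≤ p.2 := by
  intro p hp
  have he : files.foldl (fun d f => d.modify (pvExtOf f) 0 (· + 1))
      (PySem.Dict.empty : PySem.Dict String Int)
      = PySem.Dict.counter (files.map pvExtOf) := by
    rw [PySem.Dict.counter_eq_foldl, List.foldl_map]
  rw [he, PySem.Dict.items_counter] at hp
  obtain ⟨k, hk, rfl⟩ := List.mem_map.mp hp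
  have hk' : k ∈ files.map pvExtOf := (PySem.Set.mem_ofList _ _).mp hk
  have : 1 ≤ (files.map pvExtOf).count k := List.count_pos_iff.mpr hk'
  simpa using this

-- ===== VERDICT (by name: the statement is the Claim_ definition above) =====
theorem get_data_format_py_spec : Claim_equal_get_data_format_py := by
  intro files _
  unfold Spec_get_data_format_py get_data_format_py get_data_format_py_alt
  dsimp only
  rw [pvSel_eq_sorted _ (pvCounts_items_pos files), pvFind_eq_find?]
  cases (PySem.List.sorted
      (files.foldl (fun d f => d.modify (pvExtOf f) 0 (· + 1))
        (PySem.Dict.empty : PySem.Dict String Int)).items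
      (fun x => x.2) true).find? (fun p => pvSupport.contains p.1) with
  | none => rfl
  | some q => rfl
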